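-- pv_equiv track=rewrite | github.com/daemon-node-byte/ableton_mcp | scripts/validate_browser_loading_batch.py | pick_native_instrument_name
-- ===== SOURCE A (Python) =====
-- PREFERRED_NATIVE_INSTRUMENTS = ("Drift", "Analog", "Operator")
--
-- def pick_native_instrument_name(instrument_items):
--     available_names = [item["name"] for item in instrument_items if item.get("is_loadable")]
--     for preferred_name in PREFERRED_NATIVE_INSTRUMENTS:
--         if preferred_name in available_names:
--             return preferred_name
--     if available_names:
--         return available_names[0]
--     raise AssertionError("No loadable native instrument names were discovered")
-- ===== SOURCE B (Python) =====
-- PREFERRED_NATIVE_INSTRUMENTS = ("Drift", "Analog", "Operator")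
--
-- def pick_native_instrument_name(instrument_items):
--     first_loadable = None
--     best_rank = len(PREFERRED_NATIVE_INSTRUMENTS)
--     for item in instrument_items:
--         if item.get("is_loadable"):
--             name = item["name"]
--             if first_loadable is None:
--                 first_loadable = name
--             if name in PREFERRED_NATIVE_INSTRUMENTS:
--                 r = PREFERRED_NATIVE_INSTRUMENTS.index(name)
--                 if r < best_rank:
--                     best_rank = r
--     if best_rank < len(PREFERRED_NATIVE_INSTRUMENTS):
--         return PREFERRED_NATIVE_INSTRUMENTS[best_rank]
--     if first_loadable is not None:
--         return first_loadable
--     raise AssertionError("No loadable native instrument names were discovered")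
-- ===== Notes on version B (the rewrite author's own statement) =====
-- stated objective: alternative
-- what changed: Replaces the build-a-list-then-scan-it-once-per-preferred-name shape with a single pass over the items that tracks the first loadable name and the best preferred rank.
import Mathlib
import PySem

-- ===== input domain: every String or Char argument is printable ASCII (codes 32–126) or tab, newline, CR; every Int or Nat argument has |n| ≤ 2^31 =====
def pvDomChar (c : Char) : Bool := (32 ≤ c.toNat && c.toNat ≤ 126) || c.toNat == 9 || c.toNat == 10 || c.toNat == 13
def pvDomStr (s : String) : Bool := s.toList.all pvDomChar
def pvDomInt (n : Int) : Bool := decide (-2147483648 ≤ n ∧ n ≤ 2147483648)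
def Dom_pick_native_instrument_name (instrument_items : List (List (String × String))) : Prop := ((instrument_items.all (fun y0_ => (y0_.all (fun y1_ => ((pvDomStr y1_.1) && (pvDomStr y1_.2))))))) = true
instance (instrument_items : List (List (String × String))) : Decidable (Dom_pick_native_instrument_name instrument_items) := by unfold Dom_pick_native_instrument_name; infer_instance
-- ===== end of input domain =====

-- B replaces A's build-the-loadable-name-list-then-scan-it-per-preferred-name shape with a
-- single fold over the items tracking the first loadable name and the best preferred rank
-- (objective: alternative decomposition, same cost).


-- dicts are assoc lists (first-match lookup); item.get("is_loadable") is truthy iff the key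
-- is present with a non-empty string value (the values here are strings)
def pvLoadable (it : List (String × String)) : Bool :=
  match it.lookup "is_loadable" with
  | some v => !(v == "")
  | none => false

-- item["name"]; KeyError (key absent) is excluded by Pre_, the default "" is never reached there
def pvName (it : List (String × String)) : String :=
  (it.lookup "name").getD ""

def pvPreferred : List String := ["Drift", "Analog", "Operator"]

-- ===== PORT A =====
-- the for-loop over PREFERRED_NATIVE_INSTRUMENTS, returning the first preferred name present
def pvForPreferred : List String → List String → Option String
  | [], _ => none
  | p :: ps, avail => if avail.contains p then some p else pvForPreferred ps avail

-- the code after the comprehension: the preferred-loop, then the fallback return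
def pvAfterList (available_names : List String) : String :=
  match pvForPreferred pvPreferred available_names with
  | some p => p
  | none =>
    match available_names with
    | n :: _ => n
    | [] => ""  -- AssertionError in Python; excluded by Pre_

def pick_native_instrument_name (instrument_items : List (List (String × String))) : String :=
  pvAfterList ((instrument_items.filter pvLoadable).map pvName)

-- ===== PORT B =====
-- loop body: update (first_loadable, best_rank) for one item
def pvStep (st : Option String × Nat) (it : List (String × String)) : Option String × Nat :=
  if pvLoadable it then
    let name := pvName it
    let fl := match st.1 with | none => some name | some x => some x
    let br := match PySem.List.index? pvPreferred name with
      | some r => if r < st.2 then r else st.2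
      | none => st.2
    (fl, br)
  else st

-- the code after the loop: pick by best rank, else first loadable
def pvAfterLoop (st : Option String × Nat) : String :=
  if st.2 < pvPreferred.length then pvPreferred.getD st.2 ""
  else
    match st.1 with
    | some n => n
    | none => ""  -- AssertionError in Python; excluded by Pre_

def pick_native_instrument_name_alt (instrument_items : List (List (String × String))) : String :=
  pvAfterLoop (instrument_items.foldl pvStep (none, pvPreferred.length))

-- ===== PRECONDITION & SPEC =====
-- Pre_ = exactly the inputs where Python A returns: at least one loadable item exists
-- (otherwise A raises AssertionError) and every loadable item has a "name" key
-- (otherwise the comprehension raises KeyError).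
def Pre_pick_native_instrument_name (instrument_items : List (List (String × String))) : Prop :=
  instrument_items.filter pvLoadable ≠ [] ∧
  ∀ it ∈ instrument_items.filter pvLoadable, (it.lookup "name").isSome

instance (instrument_items : List (List (String × String))) : Decidable (Pre_pick_native_instrument_name instrument_items) := by unfold Pre_pick_native_instrument_name; infer_instance

def pvWitness_pick_native_instrument_name : (List (List (String × String))) :=
  [[("name", "Wavetable"), ("is_loadable", "1")]]

def Spec_pick_native_instrument_name (instrument_items : List (List (String × String))) (out : String) : Prop := out = pick_native_instrument_name_alt instrument_items
instance (instrument_items : List (List (String × String))) (out : String) : Decidable (Spec_pick_native_instrument_name instrument_items out) := by unfold Spec_pick_native_instrument_name; infer_instance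

-- ===== CLAIM (what is proved, stated in full; the proofs are below) =====
def Claim_equal_pick_native_instrument_name : Prop := ∀ (instrument_items : List (List (String × String))), Dom_pick_native_instrument_name instrument_items → Pre_pick_native_instrument_name instrument_items → Spec_pick_native_instrument_name instrument_items (pick_native_instrument_name instrument_items)

-- ===== LEMMAS AND PROOFS =====

-- rank of a name in the preferred list, 3 if absent
def pvRank (n : String) : Nat := ((PySem.List.index? pvPreferred n).getD 3)

-- minimum rank over a list of names
def pvM : List String → Nat
  | [] => 3
  | n :: l => Nat.min (pvRank n) (pvM l)

theorem pvM_le (l : List String) : pvM l ≤ 3 := by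
  induction l with
  | nil => simp [pvM]
  | cons n l ih => simp [pvM]; omega

theorem pvBr_eq_min (name : String) (b : Nat) (hb : b ≤ 3) :
    (match PySem.List.index? pvPreferred name with
      | some r => if r < b then r else b
      | none => b) = Nat.min b (pvRank name) := by
  unfold pvRank
  cases h : PySem.List.index? pvPreferred name with
  | none => simp [Nat.min_def]; omega
  | some r => simp only [Option.getD_some, Nat.min_def]; split_ifs <;> omega

theorem pvFold_char (items : List (List (String × String))) :
    ∀ (o : Option String) (b : Nat), b ≤ 3 →
    items.foldl pvStep (o, b) =
      ((match o with
        | some x => some x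
        | none => ((items.filter pvLoadable).map pvName).head?),
       Nat.min b (pvM ((items.filter pvLoadable).map pvName))) := by
  induction items with
  | nil =>
    intro o b hb
    cases o <;> simp [pvM, Nat.min_def] <;> omega
  | cons it items ih =>
    intro o b hb
    by_cases hl : pvLoadable it
    · have hstep : pvStep (o, b) it =
        ((match o with | none => some (pvName it) | some x => some x),
         Nat.min b (pvRank (pvName it))) := by
        simp only [pvStep, hl, if_pos]
        rw [pvBr_eq_min (pvName it) b hb]
      have hb' : Nat.min b (pvRank (pvName it)) ≤ 3 :=
        le_trans (Nat.min_le_left _ _) hb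
      simp only [List.foldl_cons, hstep, ih _ _ hb', List.filter_cons, hl, if_pos,
        List.map_cons, List.head?_cons, pvM]
      cases o <;> simp only [Nat.min_def] <;> split_ifs <;> first | rfl | omega
    · have hstep : pvStep (o, b) it = (o, b) := by simp [pvStep, hl]
      rw [List.foldl_cons, hstep, List.filter_cons, if_neg (by simp [hl])]
      exact ih o b hb

theorem pvRank_drift : pvRank "Drift" = 0 := by decide
theorem pvRank_analog : pvRank "Analog" = 1 := by decide
theorem pvRank_operator : pvRank "Operator" = 2 := by decide
theorem pvRank_other (n : String) (h1 : n ≠ "Drift") (h2 : n ≠ "Analog") (h3 : n ≠ "Operator") :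
    pvRank n = 3 := by
  have hmem : n ∉ pvPreferred := by simp [pvPreferred, h1, h2, h3]
  rw [pvRank, (PySem.List.index?_eq_none_iff pvPreferred n).mpr hmem]
  rfl

theorem pvM_char (l : List String) :
    pvM l = if l.contains "Drift" then 0
      else if l.contains "Analog" then 1
      else if l.contains "Operator" then 2
      else 3 := by
  induction l with
  | nil => simp [pvM]
  | cons n l ih =>
    simp only [pvM, ih, List.contains_cons]
    by_cases h1 : n = "Drift"
    · subst h1; simp [pvRank_drift]
    · by_cases h2 : n = "Analog"
      · subst h2
        simp only [pvRank_analog, show ("Drift" == "Analog") = false from by decide,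
          show ("Analog" == "Analog") = true from rfl, Bool.false_or, Bool.true_or]
        split_ifs <;> rfl
      · by_cases h3 : n = "Operator"
        · subst h3
          simp only [pvRank_operator, show ("Drift" == "Operator") = false from by decide,
            show ("Analog" == "Operator") = false from by decide,
            show ("Operator" == "Operator") = true from rfl, Bool.false_or, Bool.true_or]
          split_ifs <;> rfl
        · simp only [pvRank_other n h1 h2 h3,
            show ("Drift" == n) = false from by simp [Ne.symm h1],
            show ("Analog" == n) = false from by simp [Ne.symm h2],
            show ("Operator" == n) = false from by simp [Ne.symm h3], Bool.false_or]
          split_ifs <;> rfl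

theorem pvFor_char (l : List String) :
    pvForPreferred pvPreferred l =
      (if l.contains "Drift" then some "Drift"
       else if l.contains "Analog" then some "Analog"
       else if l.contains "Operator" then some "Operator"
       else none) := by
  simp only [pvPreferred]
  rw [pvForPreferred, pvForPreferred, pvForPreferred]
  split_ifs <;> simp_all [pvForPreferred]

-- ===== VERDICT (by name: the statement is the Claim_ definition above) =====
theorem pick_native_instrument_name_spec : Claim_equal_pick_native_instrument_name := by
  intro items _ hpre
  unfold Spec_pick_native_instrument_name
  obtain ⟨hne, _⟩ := hpre
  unfold pick_native_instrument_name pick_native_instrument_name_alt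
  have hlen : pvPreferred.length = 3 := rfl
  rw [hlen, pvFold_char items none 3 (by omega)]
  set l := (items.filter pvLoadable).map pvName with hl
  have hmin : Nat.min 3 (pvM l) = pvM l := Nat.min_eq_right (pvM_le l)
  have hlne : l ≠ [] := by
    simp only [hl, ne_eq, List.map_eq_nil_iff]; exact hne
  rw [hmin]
  unfold pvAfterList pvAfterLoop
  rw [pvFor_char, pvM_char, hlen]
  clear_value l
  by_cases h1 : "Drift" ∈ l
  · simp [h1, pvPreferred]
  · by_cases h2 : "Analog" ∈ l
    · simp [h1, h2, pvPreferred]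
    · by_cases h3 : "Operator" ∈ l
      · simp [h1, h2, h3, pvPreferred]
      · cases l with
        | nil => exact absurd rfl hlne
        | cons n t =>
          simp only [List.mem_cons, not_or] at h1 h2 h3
          simp [h1.1, h1.2, h2.1, h2.2, h3.1, h3.2]
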